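-- pv_equiv track=rewrite | github.com/Jorge-Luques/repo_python | RetoCursera.py | panprimo
-- ===== SOURCE A (Python) =====
-- def panprimo(n):
--     numText = str(n)
--     for i in range(10):
--         if str(i) not in numText:
--             return False
--
--     ult3 = n % 1000
--     for j in range((ult3//2)+1):
--         if j > 1:
--             if ult3 % j == 0:
--                 return False
--     return True
-- ===== SOURCE B (Python) =====
-- def panprimo(n):
--     s = str(n)
--     if not all(d in s for d in '0123456789'):
--         return False
--     ult3 = n % 1000
--     j = 2
--     while j * j <= ult3:
--         if ult3 % j == 0:
--             return False
--         j += 1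
--     return True
-- ===== Notes on version B (the rewrite author's own statement) =====
-- stated objective: alternative
-- what changed: Replaces A's trial division over all candidate divisors up to half of the last-three-digit value (with the guard skipping the first two candidates inside the loop) by a while loop testing divisors only while their square stays below that value, and folds the ten digit-presence tests into a single all(...) over the digit characters.
import Mathlib
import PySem

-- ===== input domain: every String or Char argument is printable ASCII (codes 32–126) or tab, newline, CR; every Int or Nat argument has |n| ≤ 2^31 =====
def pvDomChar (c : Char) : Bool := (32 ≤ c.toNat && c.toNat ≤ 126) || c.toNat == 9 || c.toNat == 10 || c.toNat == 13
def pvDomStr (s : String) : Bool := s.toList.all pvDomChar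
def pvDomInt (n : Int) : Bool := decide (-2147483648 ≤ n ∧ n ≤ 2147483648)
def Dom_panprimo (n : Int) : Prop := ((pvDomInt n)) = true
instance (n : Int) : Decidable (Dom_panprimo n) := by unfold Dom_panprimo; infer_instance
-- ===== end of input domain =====

-- B replaces A's trial division up to ult3//2 by a √-bounded while loop (j*j ≤ ult3); same values everywhere.

-- ===== PORT A =====
def panprimo (n : Int) : Bool :=
  let numText := PySem.Int.toStr n
  -- for i in range(10): if str(i) not in numText: return False
  if (PySem.List.pyRange 0 10 1).all
      (fun i => PySem.Str.isIn (PySem.Int.toStr i) numText) then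
    let ult3 := PySem.Int.mod n 1000
    -- for j in range((ult3//2)+1): if j > 1 and ult3 % j == 0: return False
    (PySem.List.pyRange 0 (PySem.Int.floordiv ult3 2 + 1) 1).all
      (fun j => !(decide (1 < j) && (PySem.Int.mod ult3 j == 0)))
  else false

-- ===== PORT B =====
-- while j * j <= ult3: if ult3 % j == 0: return False; j += 1  (fuel ult3.toNat+1 ≥ number of iterations)
def pvTrialLoop (ult3 : Int) (j : Int) : Nat → Bool
  | 0 => true
  | fuel + 1 =>
    if j * j ≤ ult3 then
      if PySem.Int.mod ult3 j == 0 then false else pvTrialLoop ult3 (j + 1) fuel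
    else true

def panprimo_alt (n : Int) : Bool :=
  let s := PySem.Int.toStr n
  if "0123456789".toList.all (fun d => PySem.Str.isIn (String.mk [d]) s) then
    let ult3 := PySem.Int.mod n 1000
    pvTrialLoop ult3 2 (ult3.toNat + 1)
  else false

-- ===== PRECONDITION & SPEC =====
def Spec_panprimo (n : Int) (out : Bool) : Prop := out = panprimo_alt n
instance (n : Int) (out : Bool) : Decidable (Spec_panprimo n out) := by unfold Spec_panprimo; infer_instance

-- ===== CLAIM (what is proved, stated in full; the proofs are below) =====
def Claim_equal_panprimo : Prop := ∀ (n : Int), Dom_panprimo n → Spec_panprimo n (panprimo n)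

-- ===== LEMMAS AND PROOFS =====

-- The two digit checks are the same ten substring tests.
theorem pv_digits_eq (s : String) :
    ((PySem.List.pyRange 0 10 1).all (fun i => PySem.Str.isIn (PySem.Int.toStr i) s))
      = ("0123456789".toList.all (fun d => PySem.Str.isIn (String.mk [d]) s)) := by
  rfl

-- A's loop over range(ult3//2 + 1) and B's √-bounded while loop agree for every m in [0, 1000).
set_option maxRecDepth 100000 in
set_option maxHeartbeats 4000000 in
theorem pv_loops_eq_all :
    ((List.range 1000).all (fun k =>
      ((PySem.List.pyRange 0 (PySem.Int.floordiv (k : Int) 2 + 1) 1).all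
          (fun j => !(decide (1 < j) && (PySem.Int.mod (k : Int) j == 0))))
        == pvTrialLoop (k : Int) 2 ((k : Int).toNat + 1))) = true := by
  decide

theorem pv_loops_eq (m : Int) (h0 : 0 ≤ m) (h1 : m < 1000) :
    ((PySem.List.pyRange 0 (PySem.Int.floordiv m 2 + 1) 1).all
        (fun j => !(decide (1 < j) && (PySem.Int.mod m j == 0))))
      = pvTrialLoop m 2 (m.toNat + 1) := by
  have hall := pv_loops_eq_all
  rw [List.all_eq_true] at hall
  have hmem : m.toNat ∈ List.range 1000 := by
    rw [List.mem_range]; omega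
  have := hall _ hmem
  rw [beq_iff_eq] at this
  have hc : ((m.toNat : Int)) = m := Int.toNat_of_nonneg h0
  rw [hc] at this
  exact this

theorem pv_mod_bounds (n : Int) : 0 ≤ PySem.Int.mod n 1000 ∧ PySem.Int.mod n 1000 < 1000 := by
  rw [PySem.Int.mod_eq_emod_of_pos (by norm_num : (0:Int) < 1000)]
  exact ⟨Int.emod_nonneg n (by norm_num), Int.emod_lt_of_pos n (by norm_num)⟩

-- ===== VERDICT (by name: the statement is the Claim_ definition above) =====
theorem panprimo_spec : Claim_equal_panprimo := by
  intro n _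
  unfold Spec_panprimo panprimo panprimo_alt
  simp only [pv_digits_eq]
  obtain ⟨h0, h1⟩ := pv_mod_bounds n
  split
  · exact pv_loops_eq _ h0 h1
  · rfl
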